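-- pv_equiv track=rewrite | github.com/Arsen1302/Code-copy-detector | TestData/solutions/problem_548_5.py | solution_548_5
-- ===== SOURCE A (Python) =====
-- from typing import List
--
-- def solution_548_5(grid: List[List[int]]) -> int:
--     m, n = len(grid), len(grid[0])
--     ans = [0] * n
--     for r in grid:
--         if r[0]:
--             for i in range(n):
--                 ans[i] += r[i]
--         else:
--             for i in range(n):
--                 ans[i] += 1-r[i]
--     ret = 0
--     for i in range(n):
--         ret += max(ans[-1-i], m-ans[-1-i]) * (1<<i)
--     return ret
-- ===== SOURCE B (Python) =====
-- from typing import List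
--
-- def solution_548_5(grid: List[List[int]]) -> int:
--     m, n = len(grid), len(grid[0])
--
--     def sums(lo, hi):
--         # column sums of first-element-normalized rows lo..hi-1, by halving
--         if hi - lo == 1:
--             r = grid[lo]
--             return [r[i] if r[0] else 1 - r[i] for i in range(n)]
--         mid = (lo + hi) // 2
--         return [a + b for a, b in zip(sums(lo, mid), sums(mid, hi))]
--
--     ret = 0
--     for v in sums(0, m):
--         ret = 2 * ret + max(v, m - v)
--     return ret
-- ===== Notes on version B (the rewrite author's own statement) =====
-- stated objective: alternative
-- what changed: Replaces A's row-major pass mutating a per-column accumulator array plus a second negative-indexed shift-weighted pass by a divide-and-conquer recursion that halves the row range and merges column-sum vectors with elementwise zip addition, then combines the columns left-to-right with a Horner scheme (ret = 2*ret + max(v, m-v)) instead of explicit bit weights.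
import Mathlib
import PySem

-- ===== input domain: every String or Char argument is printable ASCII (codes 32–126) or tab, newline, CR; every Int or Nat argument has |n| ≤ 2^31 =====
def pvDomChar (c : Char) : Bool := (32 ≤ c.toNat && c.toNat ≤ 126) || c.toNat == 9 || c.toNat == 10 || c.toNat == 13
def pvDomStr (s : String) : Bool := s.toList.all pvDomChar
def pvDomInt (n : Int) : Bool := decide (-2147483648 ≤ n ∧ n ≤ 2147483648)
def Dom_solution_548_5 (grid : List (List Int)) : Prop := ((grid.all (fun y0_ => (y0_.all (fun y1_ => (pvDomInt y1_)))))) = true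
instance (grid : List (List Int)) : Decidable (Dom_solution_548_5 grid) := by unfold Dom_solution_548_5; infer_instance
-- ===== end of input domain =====

-- B replaces A's row-major accumulation into a mutable per-column array (read back with
-- negative indices and bit weights) by a divide-and-conquer merge of column-sum vectors
-- combined with a Horner fold; return values only.

-- ===== PORT A =====
def solution_548_5 (grid : List (List Int)) : Int :=
  let m : Int := grid.length
  let n : Nat := (PySem.List.pyGetD grid 0 []).length
  let ans : List Int := grid.foldl (fun ans r =>
      if PySem.List.pyGetD r 0 0 ≠ 0 then
        (PySem.List.pyRange 0 (n : Int) 1).foldl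
          (fun a i => PySem.List.pySetD a i (PySem.List.pyGetD a i 0 + PySem.List.pyGetD r i 0)) ans
      else
        (PySem.List.pyRange 0 (n : Int) 1).foldl
          (fun a i => PySem.List.pySetD a i (PySem.List.pyGetD a i 0 + (1 - PySem.List.pyGetD r i 0))) ans)
    (List.replicate n 0)
  (PySem.List.pyRange 0 (n : Int) 1).foldl
    (fun ret i => ret + max (PySem.List.pyGetD ans (-1 - i) 0) (m - PySem.List.pyGetD ans (-1 - i) 0) * 2 ^ i.toNat) 0

-- ===== PORT B =====
-- Source B's recursive `sums(lo, hi)`; lo/hi are the nonnegative indices 0..m the Python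
-- recursion actually passes, so (lo+hi)//2 is Nat division.  The `hi ≤ lo` guard only
-- makes the recursion total in Lean (Python's sums never reaches that case from sums(0,m)).
def bSums (grid : List (List Int)) (n : Nat) (lo hi : Nat) : List Int :=
  if hi ≤ lo then []
  else if hi - lo = 1 then
    (PySem.List.pyRange 0 (n : Int) 1).map (fun i =>
      if PySem.List.pyGetD (PySem.List.pyGetD grid ((lo : Int)) []) 0 0 ≠ 0 then
        PySem.List.pyGetD (PySem.List.pyGetD grid ((lo : Int)) []) i 0
      else 1 - PySem.List.pyGetD (PySem.List.pyGetD grid ((lo : Int)) []) i 0)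
  else
    List.zipWith (· + ·) (bSums grid n lo ((lo + hi) / 2)) (bSums grid n ((lo + hi) / 2) hi)
termination_by hi - lo
decreasing_by all_goals omega

def solution_548_5_alt (grid : List (List Int)) : Int :=
  let m : Int := grid.length
  let n : Nat := (PySem.List.pyGetD grid 0 []).length
  (bSums grid n 0 grid.length).foldl (fun ret v => 2 * ret + max v (m - v)) 0

-- ===== PRECONDITION & SPEC =====
-- Pre_ excludes exactly the inputs on which the Python A raises IndexError: the empty grid
-- (grid[0]), a grid whose first row is empty (r[0]), and grids with a row shorter than the
-- first row (r[i] for i < n).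
def Pre_solution_548_5 (grid : List (List Int)) : Prop :=
  grid ≠ [] ∧ (grid.headD []).length ≠ 0 ∧ ∀ r ∈ grid, (grid.headD []).length ≤ r.length
instance (grid : List (List Int)) : Decidable (Pre_solution_548_5 grid) := by
  unfold Pre_solution_548_5; infer_instance
def pvWitness_solution_548_5 : List (List Int) := [[1, 0], [0, 1], [0, 0]]

def Spec_solution_548_5 (grid : List (List Int)) (out : Int) : Prop := out = solution_548_5_alt grid
instance (grid : List (List Int)) (out : Int) : Decidable (Spec_solution_548_5 grid out) := by
  unfold Spec_solution_548_5; infer_instance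

-- ===== CLAIM (what is proved, stated in full; the proofs are below) =====
def Claim_equal_solution_548_5 : Prop := ∀ (grid : List (List Int)), Dom_solution_548_5 grid → Pre_solution_548_5 grid → Spec_solution_548_5 grid (solution_548_5 grid)

-- ===== LEMMAS AND PROOFS =====

-- value a row contributes to column j
def gval (r : List Int) (i : Int) : Int :=
  if PySem.List.pyGetD r 0 0 ≠ 0 then PySem.List.pyGetD r i 0 else 1 - PySem.List.pyGetD r i 0

theorem rowStep_gen (h : Int → Int) (m n : Nat) (f : Nat → Int) (hm : m ≤ n) :
    (PySem.List.pyRange 0 (m : Int) 1).foldl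
      (fun a i => PySem.List.pySetD a i (PySem.List.pyGetD a i 0 + h i)) ((List.range n).map f)
    = (List.range n).map (fun j => if j < m then f j + h ↑j else f j) := by
  induction m with
  | zero => simp [PySem.List.pyRange_one_eq_nil]
  | succ m ih =>
    have hcast : ((m + 1 : Nat) : Int) = (m : Int) + 1 := by push_cast; ring
    rw [hcast, PySem.List.pyRange_one_succ_right (by positivity), List.foldl_append,
      ih (by omega)]
    simp only [List.foldl_cons, List.foldl_nil, PySem.List.pySetD_natCast,
      PySem.List.pyGetD_natCast]
    apply List.ext_getElem (by simp)
    intro k hk1 hk2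
    simp only [List.getElem_set, List.getElem_map, List.getElem_range]
    have hgd : (((List.range n).map fun j => if j < m then f j + h ↑j else f j).getD m 0) = f m := by
      rw [List.getD_eq_getElem _ _ (by simpa using (by omega : m < n))]
      simp only [List.getElem_map, List.getElem_range]
      simp
    rw [hgd]
    split_ifs with h1 <;> first | rfl | omega | (subst h1; rfl)

theorem rowStep (h : Int → Int) (n : Nat) (f : Nat → Int) :
    (PySem.List.pyRange 0 (n : Int) 1).foldl
      (fun a i => PySem.List.pySetD a i (PySem.List.pyGetD a i 0 + h i)) ((List.range n).map f)
    = (List.range n).map (fun j => f j + h ↑j) := by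
  rw [rowStep_gen h n n f le_rfl]
  exact List.map_congr_left (fun j hj => by simp [List.mem_range.1 hj])

theorem ansLoop (n : Nat) (rs : List (List Int)) (f : Nat → Int) :
    rs.foldl (fun ans r =>
        if PySem.List.pyGetD r 0 0 ≠ 0 then
          (PySem.List.pyRange 0 (n : Int) 1).foldl
            (fun a i => PySem.List.pySetD a i (PySem.List.pyGetD a i 0 + PySem.List.pyGetD r i 0)) ans
        else
          (PySem.List.pyRange 0 (n : Int) 1).foldl
            (fun a i => PySem.List.pySetD a i (PySem.List.pyGetD a i 0 + (1 - PySem.List.pyGetD r i 0))) ans)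
      ((List.range n).map f)
    = (List.range n).map (fun j => f j + (rs.map (fun r => gval r ↑j)).sum) := by
  induction rs generalizing f with
  | nil => simp
  | cons r rs ih =>
    rw [List.foldl_cons]
    have hstep : (if PySem.List.pyGetD r 0 0 ≠ 0 then
          (PySem.List.pyRange 0 (n : Int) 1).foldl
            (fun a i => PySem.List.pySetD a i (PySem.List.pyGetD a i 0 + PySem.List.pyGetD r i 0)) ((List.range n).map f)
        else
          (PySem.List.pyRange 0 (n : Int) 1).foldl
            (fun a i => PySem.List.pySetD a i (PySem.List.pyGetD a i 0 + (1 - PySem.List.pyGetD r i 0))) ((List.range n).map f))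
        = (List.range n).map (fun j => f j + gval r ↑j) := by
      by_cases hc : PySem.List.pyGetD r 0 0 ≠ 0
      · rw [if_pos hc, rowStep]
        exact List.map_congr_left (fun j _ => by simp [gval, hc])
      · rw [if_neg hc, rowStep]
        exact List.map_congr_left (fun j _ => by simp [gval, hc])
    rw [hstep, ih]
    exact List.map_congr_left (fun j _ => by simp [add_assoc])

theorem sum_map_range_eq_finset (n : Nat) (f : Nat → Int) :
    ((List.range n).map f).sum = ∑ k ∈ Finset.range n, f k := by
  induction n with
  | zero => simp
  | succ n ih => rw [List.range_succ, List.map_append, List.sum_append, Finset.sum_range_succ, ih]; simp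

-- the divide-and-conquer recursion computes the per-column sums of gval over rows lo..hi-1
theorem bSums_eq (grid : List (List Int)) (n : Nat) (lo hi : Nat)
    (hlt : lo < hi) (hhi : hi ≤ grid.length) :
    bSums grid n lo hi
      = (List.range n).map (fun (j : Nat) =>
          (((grid.drop lo).take (hi - lo)).map (fun r => gval r (↑j : Int))).sum) := by
  generalize hd : hi - lo = d
  induction d using Nat.strong_induction_on generalizing lo hi with
  | _ d ih =>
    subst hd
    rw [bSums]
    rw [if_neg (by omega)]
    by_cases h1 : hi - lo = 1
    · rw [if_pos h1]
      have hlo : lo < grid.length := by omega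
      have htake : (grid.drop lo).take (hi - lo) = [grid[lo]] := by
        rw [h1]
        rw [List.take_one, List.head?_drop]
        simp [List.getElem?_eq_getElem hlo]
      rw [htake]
      rw [show PySem.List.pyGetD grid ((lo : Int)) [] = grid[lo] by
        simp [PySem.List.pyGetD_natCast, List.getD_eq_getElem?_getD, List.getElem?_eq_getElem hlo]]
      rw [PySem.List.pyRange_zero_nat]
      rw [List.map_map]
      exact List.map_congr_left (fun j _ => by simp [gval])
    · rw [if_neg h1]
      have h2 : 2 ≤ hi - lo := by omega
      have hm1 : lo < (lo + hi) / 2 := by omega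
      have hm2 : (lo + hi) / 2 < hi := by omega
      rw [ih ((lo + hi) / 2 - lo) (by omega) lo ((lo + hi) / 2) hm1 (by omega) rfl,
          ih (hi - (lo + hi) / 2) (by omega) ((lo + hi) / 2) hi hm2 hhi rfl]
      set mid := (lo + hi) / 2 with hmid
      have hsplit : (grid.drop lo).take (hi - lo)
          = (grid.drop lo).take (mid - lo) ++ ((grid.drop mid).take (hi - mid)) := by
        rw [show hi - lo = (mid - lo) + (hi - mid) by omega, List.take_add]
        congr 1
        rw [List.drop_drop, Nat.add_sub_cancel' hm1.le]
      rw [hsplit]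
      apply List.ext_getElem
      · simp
      · intro k hk1 hk2
        simp

-- the Horner fold equals the bit-weighted sum
theorem horner (g : Nat → Int) (c : Int) (n : Nat) :
    ((List.range n).map g).foldl (fun ret v => 2 * ret + max v (c - v)) 0
      = ∑ k ∈ Finset.range n, max (g k) (c - g k) * 2 ^ (n - 1 - k) := by
  induction n with
  | zero => simp
  | succ n ih =>
    rw [List.range_succ, List.map_append, List.foldl_append, ih]
    simp only [List.map_cons, List.map_nil, List.foldl_cons, List.foldl_nil]
    rw [Finset.sum_range_succ]
    rw [Finset.mul_sum]
    have : ∀ k ∈ Finset.range n,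
        2 * (max (g k) (c - g k) * 2 ^ (n - 1 - k)) = max (g k) (c - g k) * 2 ^ (n + 1 - 1 - k) := by
      intro k hk
      have hk' := Finset.mem_range.1 hk
      rw [show n + 1 - 1 - k = (n - 1 - k) + 1 by omega]
      ring
    rw [Finset.sum_congr rfl this]
    simp

-- ===== VERDICT (by name: the statement is the Claim_ definition above) =====
theorem solution_548_5_spec : Claim_equal_solution_548_5 := by
  intro grid _ hpre
  obtain ⟨hne, hn0, -⟩ := hpre
  show solution_548_5 grid = solution_548_5_alt grid
  simp only [solution_548_5, solution_548_5_alt]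
  set n := (PySem.List.pyGetD grid 0 []).length with hn
  have hm1 : 0 < grid.length := List.length_pos_iff.2 hne
  -- B side
  rw [bSums_eq grid n 0 grid.length hm1 le_rfl]
  simp only [List.drop_zero, Nat.sub_zero, List.take_length]
  rw [horner]
  -- A side
  rw [show (List.replicate n (0 : Int)) = (List.range n).map (fun _ => 0) by simp]
  rw [ansLoop]
  rw [PySem.List.foldl_add]
  simp only [zero_add]
  rw [PySem.List.pyRange_zero_nat, List.map_map]
  rw [sum_map_range_eq_finset]
  conv_rhs => rw [← Finset.sum_range_reflect]
  refine Finset.sum_congr rfl (fun k hk => ?_)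
  have hk' := Finset.mem_range.1 hk
  simp only [Function.comp_apply, Int.toNat_natCast]
  have e1 : (-1 - (k : Int)) = -(((k + 1 : Nat)) : Int) := by push_cast; ring
  rw [e1, PySem.List.pyGetD_neg_natCast _ _ _ (by omega) (by simp; omega)]
  simp only [List.length_map, List.length_range, List.getElem_map, List.getElem_range]
  have e2 : n - (k + 1) = n - 1 - k := by omega
  have e3 : n - 1 - (n - 1 - k) = k := by omega
  rw [e2, e3]
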